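-- pv_equiv track=rewrite | github.com/Tanujarora100/StriverSDESheet | BinarySearch/1DArray/SearchSuggestionSystem.py | search_prefix_word_ceil
-- ===== SOURCE A (Python) =====
-- def search_prefix_word_ceil(products, prefix):
--     start = 0
--     end = len(products)-1
--     while start <= end:
--         mid = start+(end-start)//2
--         if products[mid] < prefix:
--             start = mid+1
--         else:
--             end = mid-1
--     return start
-- ===== SOURCE B (Python) =====
-- def search_prefix_word_ceil(products, prefix):
--     def rec(seg):
--         if not seg:
--             return 0
--         m = (len(seg) - 1) // 2
--         if seg[m] < prefix:
--             return m + 1 + rec(seg[m + 1:])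
--         return rec(seg[:m])
--     return rec(products)
-- ===== Notes on version B (the rewrite author's own statement) =====
-- stated objective: alternative
-- what changed: Replaces A's iterative lo/hi binary-search loop with a recursive divide-and-conquer over list slices that returns a relative index and adds offsets back up, preserving the exact pivot/comparison sequence (so it agrees even on unsorted input).
import Mathlib
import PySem

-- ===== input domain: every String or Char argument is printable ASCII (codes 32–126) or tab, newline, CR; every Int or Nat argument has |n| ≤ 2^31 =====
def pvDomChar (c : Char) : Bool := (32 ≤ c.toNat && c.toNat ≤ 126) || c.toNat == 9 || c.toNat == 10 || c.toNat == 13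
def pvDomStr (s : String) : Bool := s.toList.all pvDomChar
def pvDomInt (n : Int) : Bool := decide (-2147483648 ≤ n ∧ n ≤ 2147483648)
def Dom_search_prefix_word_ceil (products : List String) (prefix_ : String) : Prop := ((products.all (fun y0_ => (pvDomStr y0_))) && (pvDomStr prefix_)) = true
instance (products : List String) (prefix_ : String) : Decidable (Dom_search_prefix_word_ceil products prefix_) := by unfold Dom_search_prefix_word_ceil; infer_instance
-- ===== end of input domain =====

-- B replaces A's iterative lo/hi binary-search loop by a recursive divide-and-conquer over list
-- slices that returns a relative index (objective: alternative decomposition, same comparison sequence).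

-- ===== PORT A =====
-- while start <= end: mid = start+(end-start)//2; if products[mid] < prefix: start = mid+1 else end = mid-1
-- (the Nat argument is fuel, a totality guard only; the entry supplies enough for the loop to finish)
def spwLoop (products : List String) (prefix_ : String) : Nat → Int → Int → Int
  | 0, start, _ => start
  | fuel + 1, start, end_ =>
    if start ≤ end_ then
      let mid := start + PySem.Int.floordiv (end_ - start) 2
      match PySem.List.pyGet? products mid with
      | some p =>
          if p < prefix_ then spwLoop products prefix_ fuel (mid + 1) end_
          else spwLoop products prefix_ fuel start (mid - 1)
      | none => start   -- unreachable in A's own calls (mid stays in range)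
    else start

def search_prefix_word_ceil (products : List String) (prefix_ : String) : Int :=
  spwLoop products prefix_ products.length 0 ((products.length : Int) - 1)

-- ===== PORT B =====
-- rec(seg): empty -> 0; m = (len(seg)-1)//2; seg[m] < prefix -> m+1+rec(seg[m+1:]); else rec(seg[:m])
-- (fuel is a totality guard only; the entry supplies len(products), which always suffices)
def spwRec (prefix_ : String) : Nat → List String → Int
  | _, [] => 0
  | 0, _ :: _ => 0   -- fuel exhausted: unreachable from the entry
  | fuel + 1, x :: rest =>
    let seg := x :: rest
    let m := (seg.length - 1) / 2
    match seg[m]? with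
    | some p =>
        if p < prefix_ then ((m : Int) + 1) + spwRec prefix_ fuel (seg.drop (m + 1))
        else spwRec prefix_ fuel (seg.take m)
    | none => 0   -- unreachable, m < len(seg)

def search_prefix_word_ceil_alt (products : List String) (prefix_ : String) : Int :=
  spwRec prefix_ products.length products

-- ===== PRECONDITION & SPEC =====
def Spec_search_prefix_word_ceil (products : List String) (prefix_ : String) (out : Int) : Prop := out = search_prefix_word_ceil_alt products prefix_
instance (products : List String) (prefix_ : String) (out : Int) : Decidable (Spec_search_prefix_word_ceil products prefix_ out) := by unfold Spec_search_prefix_word_ceil; infer_instance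

-- ===== CLAIM (what is proved, stated in full; the proofs are below) =====
def Claim_equal_search_prefix_word_ceil : Prop := ∀ (products : List String) (prefix_ : String), Dom_search_prefix_word_ceil products prefix_ → Spec_search_prefix_word_ceil products prefix_ (search_prefix_word_ceil products prefix_)

-- ===== LEMMAS AND PROOFS =====

-- spwRec on a nonempty segment with enough fuel, with the in-range index resolved.
lemma spwRec_succ (prefix_ : String) (fuel : Nat) (seg : List String) (h : seg ≠ []) :
    spwRec prefix_ (fuel + 1) seg =
      if seg[(seg.length - 1) / 2]'(by have := List.length_pos_iff.mpr h; omega) < prefix_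
      then (((seg.length - 1) / 2 : Nat) : Int) + 1 + spwRec prefix_ fuel (seg.drop ((seg.length - 1) / 2 + 1))
      else spwRec prefix_ fuel (seg.take ((seg.length - 1) / 2)) := by
  cases seg with
  | nil => exact absurd rfl h
  | cons x rest =>
    rw [spwRec]
    have hlt : ((x :: rest).length - 1) / 2 < (x :: rest).length := by simp; omega
    simp only [List.getElem?_eq_getElem hlt]

-- A's loop on window [lo, hi] equals lo plus B's recursion on the slice products[lo : hi+1],
-- for any shared fuel at least the window size.
lemma spwLoop_eq_spwRec (products : List String) (prefix_ : String) :
    ∀ (fuel : Nat) (lo hi : Int), (hi + 1 - lo).toNat ≤ fuel → 0 ≤ lo → hi < (products.length : Int) →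
      spwLoop products prefix_ fuel lo hi
        = lo + spwRec prefix_ fuel ((products.drop lo.toNat).take (hi + 1 - lo).toNat) := by
  intro fuel
  induction fuel with
  | zero =>
    intro lo hi hk hlo hhi
    have : (hi + 1 - lo).toNat = 0 := by omega
    simp [spwLoop, this, spwRec]
  | succ fuel ih =>
    intro lo hi hk hlo hhi
    by_cases hle : lo ≤ hi
    · -- window nonempty: both sides take the same branch at the same pivot
      set lo' := lo.toNat with hlo'
      set L := (hi + 1 - lo).toNat with hL
      set seg := (products.drop lo').take L with hsegdef
      have hLpos : 1 ≤ L := by omega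
      have hplen : lo' + L ≤ products.length := by omega
      have hseglen : seg.length = L := by
        simp [hsegdef, List.length_take, List.length_drop]; omega
      have hsegne : seg ≠ [] := by
        intro hc; rw [hc] at hseglen; simp at hseglen; omega
      have hfd : PySem.Int.floordiv (hi - lo) 2 = (hi - lo) / 2 :=
        PySem.Int.floordiv_eq_ediv_of_pos (by omega)
      set mN : Nat := (L - 1) / 2 with hmN
      set mid : Int := lo + PySem.Int.floordiv (hi - lo) 2 with hmid
      have hmideq : mid = lo + (mN : Int) := by
        rw [hmid, hfd]; omega
      have hmNL : mN < L := by omega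
      have hmidrange : 0 ≤ mid ∧ mid < (products.length : Int) := by
        constructor <;> omega
      have hmidN : mid.toNat = lo' + mN := by omega
      have hget : PySem.List.pyGet? products mid = some (products[mid.toNat]'(by omega)) := by
        rw [PySem.List.pyGet?_of_nonneg products hmidrange.1, List.getElem?_eq_getElem (by omega)]
      have hmlt : mN < seg.length := by omega
      have hpivot : seg[mN]'hmlt = products[mid.toNat]'(by omega) := by
        simp [hsegdef, hmidN]
      rw [spwLoop]
      rw [if_pos hle]
      simp only [← hmid, hget]
      rw [spwRec_succ prefix_ fuel seg hsegne]
      have hms : (seg.length - 1) / 2 = mN := by rw [hseglen]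
      simp only [hms]
      rw [hpivot]
      by_cases hcmp : products[mid.toNat]'(by omega) < prefix_
      · rw [if_pos hcmp, if_pos hcmp]
        have hk' : (hi + 1 - (mid + 1)).toNat ≤ fuel := by omega
        rw [ih (mid + 1) hi hk' (by omega) hhi]
        have hdropeq : seg.drop (mN + 1)
            = (products.drop (mid + 1).toNat).take (hi + 1 - (mid + 1)).toNat := by
          rw [hsegdef, List.drop_take, List.drop_drop]
          have h1 : (mid + 1).toNat = lo' + (mN + 1) := by omega
          have h2 : (hi + 1 - (mid + 1)).toNat = L - (mN + 1) := by omega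
          rw [h1, h2]
        rw [hdropeq]
        ring_nf
        omega
      · rw [if_neg hcmp, if_neg hcmp]
        have hk' : ((mid - 1) + 1 - lo).toNat ≤ fuel := by omega
        rw [ih lo (mid - 1) hk' hlo (by omega)]
        have htakeeq : seg.take mN = (products.drop lo').take ((mid - 1) + 1 - lo).toNat := by
          rw [hsegdef, List.take_take]
          have h2 : ((mid - 1) + 1 - lo).toNat = mN := by omega
          rw [h2, Nat.min_eq_left (by omega)]
        rw [htakeeq]
    · rw [spwLoop]
      rw [if_neg hle]
      have : (hi + 1 - lo).toNat = 0 := by omega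
      simp [this, spwRec]

-- ===== VERDICT (by name: the statement is the Claim_ definition above) =====
theorem search_prefix_word_ceil_spec : Claim_equal_search_prefix_word_ceil := by
  intro products prefix_ _
  unfold Spec_search_prefix_word_ceil search_prefix_word_ceil search_prefix_word_ceil_alt
  have hl : (((products.length : Int) - 1) + 1 - 0).toNat = products.length := by omega
  have h := spwLoop_eq_spwRec products prefix_ products.length 0
      ((products.length : Int) - 1) (by omega) (by omega) (by omega)
  simpa [hl] using h
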